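-- pv_equiv track=rewrite | github.com/Michael14567/Signal | 9hw.py | generate_lfsr_states
-- ===== SOURCE A (Python) =====
-- def next_lfsr_state(state):
--     """
--     Регистр для h(x) = 1 + x + x^4.
--
--     Из h(x) получаем:
--         x^4 = x + 1.
--
--     Поэтому новый бит:
--         s_{t+4} = s_{t+1} + s_t mod 2.
--     """
--     new_bit = state[0] ^ state[1]
--     return state[1:] + (new_bit,)
--
-- def generate_lfsr_states(initial_state):
--     states = [initial_state]
--     current = initial_state
--
--     while True:
--         current = next_lfsr_state(current)
--         states.append(current)
--
--         if current == initial_state: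
--             break
--
--     return states
-- ===== SOURCE B (Python) =====
-- def generate_lfsr_states(initial_state):
--     # Build ONE flat bit sequence extending the register contents by the
--     # recurrence s[t+n] = s[t] ^ s[t+1], and read the successive states off it
--     # as sliding windows of width n.  The window after k extensions is exactly
--     # the k-th LFSR state, so stopping at the first window equal to the initial
--     # state (after at least one step) reproduces A's list, trailing duplicate
--     # included.
--     n = len(initial_state)
--     seq = tuple(initial_state)
--     k = 0
--     while True:
--         seq = seq + (seq[k] ^ seq[k + 1],)
--         k += 1
--         if seq[k:k + n] == initial_state:
--             break
--     return [seq[i:i + n] for i in range(k + 1)]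
-- ===== Notes on version B (the rewrite author's own statement) =====
-- stated objective: alternative
-- what changed: B builds one flat bit sequence by the recurrence s[t+n]=s[t]^s[t+1] and reads the states off it as sliding windows of width n, instead of A's loop that carries whole state tuples through next_lfsr_state; the window after k extensions is exactly the k-th LFSR state, so the lists coincide.
import Mathlib
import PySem

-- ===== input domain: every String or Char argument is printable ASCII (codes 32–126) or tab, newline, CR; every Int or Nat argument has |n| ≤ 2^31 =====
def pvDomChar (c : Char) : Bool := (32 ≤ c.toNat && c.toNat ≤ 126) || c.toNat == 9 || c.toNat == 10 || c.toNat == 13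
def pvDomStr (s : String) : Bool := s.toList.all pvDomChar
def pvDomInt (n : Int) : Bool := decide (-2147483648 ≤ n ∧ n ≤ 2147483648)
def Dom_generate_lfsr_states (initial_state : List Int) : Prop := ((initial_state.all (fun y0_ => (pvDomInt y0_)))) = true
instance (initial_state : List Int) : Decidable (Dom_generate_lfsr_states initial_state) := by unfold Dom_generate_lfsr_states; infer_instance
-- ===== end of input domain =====

-- B builds ONE flat bit sequence by the recurrence s[t+n] = s[t] ^ s[t+1] and reads the
-- states off it as sliding windows of width n (objective: alternative, same cost).
-- Both `while True:` loops are rendered with a fuel parameter that makes them structural;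
-- the loops stop at the first recurrence of the initial state, and the theorems below
-- prove the two ports equal for EVERY fuel value.

-- ===== PORT A =====
-- new_bit = state[0] ^ state[1]; return state[1:] + (new_bit,)
def next_lfsr_state (state : List Int) : List Int :=
  match PySem.List.pyGet? state 0, PySem.List.pyGet? state 1 with
  | some s0, some s1 => PySem.List.slice state (some 1) none ++ [PySem.Int.bxor s0 s1]
  | _, _ => state      -- Python raises IndexError here (len < 2); value immaterial, kept total

-- while True: current = next_lfsr_state(current); states.append(current); if current == initial_state: break
def aLoop (fuel : ℕ) (init cur : List Int) : List (List Int) :=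
  match fuel with
  | 0 => []
  | fuel + 1 =>
    if next_lfsr_state cur = init then [next_lfsr_state cur]
    else next_lfsr_state cur :: aLoop fuel init (next_lfsr_state cur)

def generate_lfsr_states (initial_state : List Int) : List (List Int) :=
  initial_state ::
    aLoop (2 ^ (initial_state.length * initial_state.length) + 2)
      initial_state initial_state

-- ===== PORT B =====
-- seq = seq + (seq[k] ^ seq[k+1],) : both indices are in range on every iteration
-- (len(seq) = n + k with n ≥ 2), so pyGetD's default is never used.
def bNext (seq : List Int) (k : ℕ) : List Int :=
  seq ++ [PySem.Int.bxor (PySem.List.pyGetD seq ((k : ℕ) : Int) 0)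
                         (PySem.List.pyGetD seq (((k + 1 : ℕ)) : Int) 0)]

-- while True: extend the flat sequence, advance k, stop when the window seq[k:k+n] equals the start
def bLoop (fuel : ℕ) (init seq : List Int) (k : ℕ) : List Int × ℕ :=
  match fuel with
  | 0 => (seq, k)
  | fuel + 1 =>
    if PySem.List.slice (bNext seq k) (some (((k + 1 : ℕ)) : Int))
        (some ((((k + 1 : ℕ)) : Int) + ((init.length : ℕ) : Int))) = init then
      (bNext seq k, k + 1)
    else bLoop fuel init (bNext seq k) (k + 1)

def generate_lfsr_states_alt (initial_state : List Int) : List (List Int) :=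
  let r := bLoop (2 ^ (initial_state.length * initial_state.length) + 2)
    initial_state initial_state 0
  (List.range (r.2 + 1)).map (fun i =>
    PySem.List.slice r.1 (some ((i : ℕ) : Int))
      (some (((i : ℕ) : Int) + ((initial_state.length : ℕ) : Int))))

-- ===== PRECONDITION & SPEC =====
-- Pre_ excludes exactly the states of length < 2, on which Python A raises IndexError.
def Pre_generate_lfsr_states (initial_state : List Int) : Prop := 2 ≤ initial_state.length
instance (initial_state : List Int) : Decidable (Pre_generate_lfsr_states initial_state) := by
  unfold Pre_generate_lfsr_states; infer_instance

def pvWitness_generate_lfsr_states : List Int := [1, 0, 0, 1]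

def Spec_generate_lfsr_states (initial_state : List Int) (out : List (List Int)) : Prop := out = generate_lfsr_states_alt initial_state
instance (initial_state : List Int) (out : List (List Int)) : Decidable (Spec_generate_lfsr_states initial_state out) := by unfold Spec_generate_lfsr_states; infer_instance

-- ===== CLAIM (what is proved, stated in full; the proofs are below) =====
def Claim_equal_generate_lfsr_states : Prop := ∀ (initial_state : List Int), Dom_generate_lfsr_states initial_state → Pre_generate_lfsr_states initial_state → Spec_generate_lfsr_states initial_state (generate_lfsr_states initial_state)

-- ===== LEMMAS AND PROOFS =====

theorem next_cons (a b : Int) (t : List Int) :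
    next_lfsr_state (a :: b :: t) = b :: (t ++ [PySem.Int.bxor a b]) := by
  have h0 : (0:ℤ) ≤ (t.length : ℤ) + 1 := by positivity
  simp [next_lfsr_state, PySem.List.pyGet?, PySem.List.pyIdx?, PySem.List.slice_from_one, h0]

theorem bNext_length (seq : List Int) (k : ℕ) : (bNext seq k).length = seq.length + 1 := by
  simp [bNext]

-- extending the flat sequence advances the sliding window by one LFSR step
theorem bNext_drop (init seq : List Int) (k : ℕ)
    (hlen : seq.length = init.length + k) (hn : 2 ≤ init.length) :
    (bNext seq k).drop (k + 1) = next_lfsr_state (seq.drop k) := by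
  obtain ⟨a, b, t, hd⟩ : ∃ a b t, seq.drop k = a :: b :: t := by
    have h2 : 2 ≤ (seq.drop k).length := by
      rw [List.length_drop, hlen]; omega
    match hd : seq.drop k, h2 with
    | a :: b :: t, _ => exact ⟨a, b, t, rfl⟩
  have hga : PySem.List.pyGetD seq ((k : ℕ) : Int) 0 = a := by
    rw [PySem.List.pyGetD_natCast]
    have h0 : (seq.drop k)[0]? = some a := by rw [hd]; rfl
    rw [List.getElem?_drop] at h0
    simp only [Nat.add_zero] at h0
    simp [List.getD_eq_getElem?_getD, h0]
  have hgb : PySem.List.pyGetD seq (((k + 1 : ℕ)) : Int) 0 = b := by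
    rw [PySem.List.pyGetD_natCast]
    have h1 : (seq.drop k)[1]? = some b := by rw [hd]; rfl
    rw [List.getElem?_drop] at h1
    simp [List.getD_eq_getElem?_getD, h1]
  have hdrop : seq.drop (k + 1) = b :: t := by
    have h2 := congrArg (List.drop 1) hd
    rw [List.drop_drop] at h2
    simpa using h2
  rw [bNext, hga, hgb, List.drop_append_of_le_length (by omega), hdrop, hd, next_cons]
  simp

-- the slice test of B's loop, as a statement about A's step
theorem bStop_iff (init seq : List Int) (k : ℕ)
    (hlen : seq.length = init.length + k) (hn : 2 ≤ init.length) :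
    (PySem.List.slice (bNext seq k) (some (((k + 1 : ℕ)) : Int))
        (some ((((k + 1 : ℕ)) : Int) + ((init.length : ℕ) : Int))) = init) ↔
      next_lfsr_state (seq.drop k) = init := by
  rw [PySem.List.slice_natCast_add, ← bNext_drop init seq k hlen hn]
  have hL : ((bNext seq k).drop (k + 1)).length = init.length := by
    rw [List.length_drop, bNext_length, hlen]; omega
  rw [← hL, List.take_length]

-- a window lying inside a prefix is a window of the prefix
theorem window_of_prefix {s t : List Int} (hp : s <+: t) {j n : ℕ} (hjn : j + n ≤ s.length) :
    (t.drop j).take n = (s.drop j).take n := by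
  obtain ⟨u, rfl⟩ := hp
  rw [List.drop_append_of_le_length (by omega),
    List.take_append_of_le_length (by rw [List.length_drop]; omega)]

-- the two loops agree step for step, for EVERY fuel value: B's final index exceeds k by
-- the number of steps taken, B only extends the sequence, and A's collected states are
-- exactly B's windows k+1 … K
theorem loop_rel : ∀ (fuel : ℕ) (init seq : List Int) (k : ℕ),
    seq.length = init.length + k → 2 ≤ init.length →
    (bLoop fuel init seq k).1.length = init.length + (bLoop fuel init seq k).2 ∧
    k ≤ (bLoop fuel init seq k).2 ∧
    seq <+: (bLoop fuel init seq k).1 ∧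
    aLoop fuel init (seq.drop k) =
      (List.range ((bLoop fuel init seq k).2 - k)).map
        (fun j => (((bLoop fuel init seq k).1.drop (k + 1 + j)).take init.length)) := by
  intro fuel
  induction fuel with
  | zero =>
    intro init seq k hlen hn
    exact ⟨hlen, le_refl k, List.prefix_refl seq, by simp [aLoop, bLoop]⟩
  | succ fuel ih =>
    intro init seq k hlen hn
    rw [aLoop, bLoop]
    by_cases hstop : PySem.List.slice (bNext seq k) (some (((k + 1 : ℕ)) : Int))
        (some ((((k + 1 : ℕ)) : Int) + ((init.length : ℕ) : Int))) = init
    · have hnext : next_lfsr_state (seq.drop k) = init :=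
        (bStop_iff init seq k hlen hn).mp hstop
      rw [if_pos hstop, if_pos hnext]
      refine ⟨(by rw [bNext_length, hlen]; omega :
          (bNext seq k).length = init.length + (k + 1)),
        (by omega : k ≤ k + 1), List.prefix_append seq _, ?_⟩
      have hw : ((bNext seq k).drop (k + 1)).take init.length =
          next_lfsr_state (seq.drop k) := by
        rw [bNext_drop init seq k hlen hn]
        apply List.take_of_length_le
        rw [← bNext_drop init seq k hlen hn, List.length_drop, bNext_length, hlen]
        omega
      simp only [show k + 1 - k = 1 by omega, List.range_one, List.map_cons, List.map_nil,
        Nat.add_zero]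
      rw [hw, hnext]
    · have hnext : ¬ next_lfsr_state (seq.drop k) = init := fun hc =>
        hstop ((bStop_iff init seq k hlen hn).mpr hc)
      rw [if_neg hstop, if_neg hnext]
      have hlen' : (bNext seq k).length = init.length + (k + 1) := by
        rw [bNext_length, hlen]; omega
      obtain ⟨ih1, ih2, ih3, ih4⟩ := ih init (bNext seq k) (k + 1) hlen' hn
      refine ⟨ih1, by omega, (List.prefix_append seq _).trans ih3, ?_⟩
      rw [bNext_drop init seq k hlen hn] at ih4
      rw [ih4]
      have hsplit : (bLoop fuel init (bNext seq k) (k + 1)).2 - k =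
          ((bLoop fuel init (bNext seq k) (k + 1)).2 - (k + 1)) + 1 := by omega
      rw [hsplit, List.range_succ_eq_map, List.map_cons, List.map_map]
      have hhead : (((bLoop fuel init (bNext seq k) (k + 1)).1.drop (k + 1 + 0)).take
          init.length) = next_lfsr_state (seq.drop k) := by
        rw [Nat.add_zero,
          window_of_prefix ih3 (by rw [bNext_length, hlen]; omega),
          bNext_drop init seq k hlen hn]
        apply List.take_of_length_le
        rw [← bNext_drop init seq k hlen hn, List.length_drop, bNext_length, hlen]
        omega
      rw [hhead]
      refine List.cons_eq_cons.mpr ⟨rfl, ?_⟩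
      apply List.map_congr_left
      intro j _
      simp only [Function.comp_apply, Nat.succ_eq_add_one]
      rw [show k + 1 + (j + 1) = k + 1 + 1 + j by omega]

-- ===== VERDICT (by name: the statement is the Claim_ definition above) =====
theorem generate_lfsr_states_spec : Claim_equal_generate_lfsr_states := by
  intro s hdom hpre
  unfold Spec_generate_lfsr_states
  have h2 : 2 ≤ s.length := hpre
  unfold generate_lfsr_states generate_lfsr_states_alt
  change s :: aLoop (2 ^ (s.length * s.length) + 2) s s =
    (List.range ((bLoop (2 ^ (s.length * s.length) + 2) s s 0).2 + 1)).map (fun i =>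
      PySem.List.slice (bLoop (2 ^ (s.length * s.length) + 2) s s 0).1 (some ((i : ℕ) : Int))
        (some (((i : ℕ) : Int) + ((s.length : ℕ) : Int))))
  obtain ⟨hL, hK, hP, hE⟩ := loop_rel (2 ^ (s.length * s.length) + 2) s s 0 rfl h2
  simp only [List.drop_zero] at hE
  have hmap : ∀ i : ℕ,
      PySem.List.slice (bLoop (2 ^ (s.length * s.length) + 2) s s 0).1 (some ((i : ℕ) : Int))
        (some (((i : ℕ) : Int) + ((s.length : ℕ) : Int))) =
      ((bLoop (2 ^ (s.length * s.length) + 2) s s 0).1.drop i).take s.length := by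
    intro i
    rw [PySem.List.slice_natCast_add]
  simp only [hmap]
  rw [List.range_succ_eq_map, List.map_cons, List.map_map]
  have hhead : (((bLoop (2 ^ (s.length * s.length) + 2) s s 0).1.drop 0).take s.length) = s := by
    rw [List.drop_zero]
    obtain ⟨u, hu⟩ := hP
    rw [← hu, List.take_append_of_le_length (le_refl s.length), List.take_length]
  rw [hhead, hE]
  refine List.cons_eq_cons.mpr ⟨rfl, ?_⟩
  simp only [Nat.sub_zero]
  apply List.map_congr_left
  intro j _
  simp only [Function.comp_apply, Nat.succ_eq_add_one]
  rw [show 0 + 1 + j = j + 1 by omega]
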